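-- pv_equiv track=rewrite | github.com/jw9603/KoGum | src/kogum/data_utils/packing.py | pack_sequences
-- ===== SOURCE A (Python) =====
-- from itertools import chain
-- from typing import Dict, List, Optional
--
-- def pack_sequences(
--     examples: Dict[str, List],
--     seq_len: int,
-- ) -> Dict[str, List]:
--     """여러 시퀀스를 고정 길이 청크로 패킹합니다.
--
--     Args:
--         examples: "input_ids" 필드를 포함한 배치 예제
--         seq_len: 목표 시퀀스 길이
--
--     Returns:
--         패킹된 "input_ids"를 포함한 딕셔너리
--
--     예시:
--         Input: {"input_ids": [[1,2,3], [4,5], [6,7,8,9]]}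
--         seq_len: 5
--         Output: {"input_ids": [[1,2,3,4,5], [6,7,8,9,...]]}
--     """
--     # 모든 input_ids를 하나의 긴 리스트로 평탄화
--     # itertools.chain.from_iterable: [[1,2], [3,4]] → [1,2,3,4]
--     all_ids = list(chain.from_iterable(examples["input_ids"]))
--
--     # 고정 길이 청크로 분할
--     # 나머지는 버림 (마지막 불완전한 청크)
--     n_chunks = len(all_ids) // seq_len
--     chunks = [all_ids[i * seq_len : (i + 1) * seq_len] for i in range(n_chunks)]
--
--     return {"input_ids": chunks}
-- ===== SOURCE B (Python) =====
-- def pack_sequences(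
--     examples,
--     seq_len,
-- ):
--     """Pack sequences into fixed-length chunks with a running buffer (single pass, no full flatten)."""
--     seqs = examples["input_ids"]
--     chunks = []
--     if seq_len > 0:
--         buf = []
--         for seq in seqs:
--             buf += seq
--             while len(buf) >= seq_len:
--                 chunks.append(buf[:seq_len])
--                 buf = buf[seq_len:]
--     return {"input_ids": chunks}
-- ===== Notes on version B (the rewrite author's own statement) =====
-- stated objective: alternative
-- what changed: B replaces A's flatten-everything-then-slice-by-index (len//seq_len windows computed from a range of indices) with a single streaming pass that extends a running buffer per sequence and greedily peels off full seq_len chunks, never materialising the whole flattened list.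
import Mathlib
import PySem

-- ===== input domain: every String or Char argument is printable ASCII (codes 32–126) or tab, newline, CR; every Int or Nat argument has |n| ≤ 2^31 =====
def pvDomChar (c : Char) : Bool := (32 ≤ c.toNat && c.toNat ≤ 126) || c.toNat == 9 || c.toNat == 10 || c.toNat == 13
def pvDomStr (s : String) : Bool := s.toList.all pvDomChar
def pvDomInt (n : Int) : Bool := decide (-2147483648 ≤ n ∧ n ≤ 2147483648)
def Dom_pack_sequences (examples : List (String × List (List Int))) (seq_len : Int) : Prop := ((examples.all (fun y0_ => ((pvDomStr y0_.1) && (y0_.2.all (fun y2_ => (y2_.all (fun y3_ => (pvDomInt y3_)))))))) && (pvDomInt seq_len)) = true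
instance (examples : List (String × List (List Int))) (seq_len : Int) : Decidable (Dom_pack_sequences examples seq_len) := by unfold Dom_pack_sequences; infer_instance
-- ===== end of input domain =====

-- B replaces A's flatten-then-index-slicing by a single pass with a running buffer (alternative decomposition; return value only).

-- ===== PORT A =====
-- A: flatten all input_ids, then slice out n_chunks = len // seq_len fixed-length windows by index.
def pack_sequences (examples : List (String × List (List Int))) (seq_len : Int) : List (String × List (List Int)) :=
  match (PySem.Dict.mk examples).get? "input_ids" with
  | none => []  -- KeyError in Python; excluded by Pre_
  | some seqss =>
    let all_ids := seqss.flatten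
    let n_chunks := PySem.Int.floordiv (all_ids.length : Int) seq_len
    let chunks := (PySem.List.pyRange 0 n_chunks 1).map (fun i =>
      PySem.List.slice all_ids (some (i * seq_len)) (some ((i + 1) * seq_len)))
    [("input_ids", chunks)]

-- ===== PORT B =====
-- B's inner `while len(buf) >= seq_len` loop (seq_len > 0): peel off full chunks from the front of the buffer.
def pvDrain (k : Nat) (chunks : List (List Int)) (buf : List Int) : List (List Int) × List Int :=
  if h1 : 0 < k ∧ k ≤ buf.length then
    pvDrain k (chunks ++ [buf.take k]) (buf.drop k)
  else (chunks, buf)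
termination_by buf.length
decreasing_by simp; omega

def pack_sequences_alt (examples : List (String × List (List Int))) (seq_len : Int) : List (String × List (List Int)) :=
  match (PySem.Dict.mk examples).get? "input_ids" with
  | none => []  -- KeyError in Python; excluded by Pre_
  | some seqss =>
    let chunks :=
      if seq_len > 0 then
        (seqss.foldl (fun st seq => pvDrain seq_len.toNat st.1 (st.2 ++ seq)) ([], [])).1
      else []
    [("input_ids", chunks)]

-- ===== PRECONDITION & SPEC =====
-- Pre_ excludes exactly the inputs where Python A raises: a missing "input_ids" key (KeyError)
-- and seq_len = 0 (ZeroDivisionError).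
def Pre_pack_sequences (examples : List (String × List (List Int))) (seq_len : Int) : Prop :=
  (PySem.Dict.mk examples).get? "input_ids" ≠ none ∧ seq_len ≠ 0
instance (examples : List (String × List (List Int))) (seq_len : Int) : Decidable (Pre_pack_sequences examples seq_len) := by unfold Pre_pack_sequences; infer_instance

def pvWitness_pack_sequences : (List (String × List (List Int))) × Int :=
  ([("input_ids", [[1, 2, 3], [4, 5]])], 2)

def Spec_pack_sequences (examples : List (String × List (List Int))) (seq_len : Int) (out : List (String × List (List Int))) : Prop := out = pack_sequences_alt examples seq_len
instance (examples : List (String × List (List Int))) (seq_len : Int) (out : List (String × List (List Int))) : Decidable (Spec_pack_sequences examples seq_len out) := by unfold Spec_pack_sequences; infer_instance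

-- ===== CLAIM (what is proved, stated in full; the proofs are below) =====
def Claim_equal_pack_sequences : Prop := ∀ (examples : List (String × List (List Int))) (seq_len : Int), Dom_pack_sequences examples seq_len → Pre_pack_sequences examples seq_len → Spec_pack_sequences examples seq_len (pack_sequences examples seq_len)

-- ===== LEMMAS AND PROOFS =====

-- Greedy chunk decomposition: the full k-chunks of l, front to back.
def pvChunks (k : Nat) (l : List Int) : List (List Int) :=
  if h : 0 < k ∧ k ≤ l.length then l.take k :: pvChunks k (l.drop k) else []
termination_by l.length
decreasing_by simp; omega

-- Remainder after removing all full k-chunks.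
def pvRem (k : Nat) (l : List Int) : List Int :=
  if h : 0 < k ∧ k ≤ l.length then pvRem k (l.drop k) else l
termination_by l.length
decreasing_by simp; omega

theorem pvDrain_eq (k : Nat) (chunks : List (List Int)) (buf : List Int) :
    pvDrain k chunks buf = (chunks ++ pvChunks k buf, pvRem k buf) := by
  fun_induction pvDrain with
  | case1 chunks buf h ih =>
    rw [pvChunks, pvRem, dif_pos h, dif_pos h, ih]; simp
  | case2 chunks buf h =>
    rw [pvChunks, pvRem, dif_neg h, dif_neg h]; simp

theorem pvRem_length_lt (k : Nat) (hk : 0 < k) (l : List Int) : (pvRem k l).length < k := by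
  fun_induction pvRem with
  | case1 l h ih => exact ih
  | case2 l h => simp at h; omega

theorem pvChunks_append (k : Nat) (hk : 0 < k) (b m : List Int) :
    pvChunks k (b ++ m) = pvChunks k b ++ pvChunks k (pvRem k b ++ m) := by
  fun_induction pvRem k b with
  | case1 b h ih =>
    conv_lhs => rw [pvChunks]
    rw [dif_pos (show 0 < k ∧ k ≤ (b ++ m).length by simp; omega)]
    conv_rhs => rw [pvChunks]
    rw [dif_pos h]
    rw [List.take_append_of_le_length h.2, List.drop_append_of_le_length h.2, ih]
    simp
  | case2 b h =>
    conv_rhs => rw [pvChunks]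
    rw [dif_neg h]
    simp

theorem pvFold_inv (k : Nat) (hk : 0 < k) (seqss : List (List Int))
    (acc : List (List Int)) (buf : List Int) (hbuf : buf.length < k) :
    (seqss.foldl (fun st seq => pvDrain k st.1 (st.2 ++ seq)) (acc, buf)).1
      = acc ++ pvChunks k (buf ++ seqss.flatten) := by
  induction seqss generalizing acc buf with
  | nil =>
    simp [List.foldl]
    rw [pvChunks, dif_neg (by simp; omega)]
  | cons s rest ih =>
    rw [List.foldl_cons, pvDrain_eq]
    rw [ih _ _ (pvRem_length_lt k hk _)]
    rw [List.flatten_cons, ← List.append_assoc, pvChunks_append k hk (buf ++ s) (rest.flatten)]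
    simp

theorem pvRange_chunks (k : Nat) (hk : 0 < k) (l : List Int) :
    (List.range (l.length / k)).map (fun j => (l.drop (j * k)).take k) = pvChunks k l := by
  fun_induction pvChunks k l with
  | case1 l h ih =>
    have hdiv : l.length / k = (l.drop k).length / k + 1 := by
      rw [List.length_drop, Nat.div_eq_sub_div hk h.2]
    rw [hdiv, List.range_succ_eq_map, List.map_cons, List.map_map]
    simp only [Nat.zero_mul, List.drop_zero]
    congr 1
    rw [← ih]
    apply List.map_congr_left
    intro j hj
    simp [List.drop_drop, Nat.succ_mul, Nat.add_comm]
  | case2 l h =>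
    rw [Nat.div_eq_of_lt (by omega)]
    simp

theorem pvA_chunks (k : Nat) (hk : 0 < k) (l : List Int) :
    (PySem.List.pyRange 0 (PySem.Int.floordiv (l.length : Int) (k : Int)) 1).map (fun i =>
      PySem.List.slice l (some (i * (k : Int))) (some ((i + 1) * (k : Int)))) = pvChunks k l := by
  rw [PySem.Int.floordiv_natCast, PySem.List.pyRange_one, List.map_map]
  rw [← pvRange_chunks k hk l]
  have ht : ((l.length / k : Nat) : Int) - 0 = ((l.length / k : Nat) : Int) := by ring
  rw [ht, Int.toNat_natCast]
  apply List.map_congr_left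
  intro j hj
  simp only [Function.comp]
  have h1 : ((0 : Int) + j) * k = ((j * k : Nat) : Int) := by push_cast; ring
  have h2 : ((0 : Int) + j + 1) * k = ((j * k : Nat) : Int) + ((k : Nat) : Int) := by push_cast; ring
  rw [h1, h2, PySem.List.slice_natCast_add]

-- ===== VERDICT (by name: the statement is the Claim_ definition above) =====
theorem pack_sequences_spec : Claim_equal_pack_sequences := by
  intro ex sl _ hpre
  unfold Spec_pack_sequences pack_sequences pack_sequences_alt
  cases hget : (PySem.Dict.mk ex).get? "input_ids" with
  | none => exact absurd hget hpre.1
  | some seqss =>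
    simp only []
    by_cases hpos : sl > 0
    · have hk : 0 < sl.toNat := by omega
      have hsl : (sl.toNat : Int) = sl := Int.toNat_of_nonneg (by omega)
      rw [if_pos hpos]
      rw [pvFold_inv sl.toNat hk seqss [] [] (by simpa using hk)]
      rw [List.nil_append, ← hsl, pvA_chunks sl.toNat hk seqss.flatten]
      simp only [Int.toNat_natCast, List.nil_append]
    · have hneg : sl < 0 := by
        rcases hpre with ⟨-, h0⟩; omega
      rw [if_neg hpos]
      have h1 := PySem.Int.floordiv_mul_add_mod (seqss.flatten.length : Int) sl
      have h2 := PySem.Int.mod_neg_bounds (a := (seqss.flatten.length : Int)) hneg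
      have hq : PySem.Int.floordiv (seqss.flatten.length : Int) sl ≤ 0 := by
        nlinarith [Int.natCast_nonneg seqss.flatten.length]
      rw [PySem.List.pyRange_one_eq_nil hq]
      simp
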